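-- pv_equiv track=rewrite | github.com/Ayman0215/MyPythonExperiments | cases_code.py | caseChecker
-- ===== SOURCE A (Python) =====
-- def caseChecker(string):
--     isUpper = False
--     isLower = False
--
--     for char in string:
--         if char.isupper():
--             isUpper = True
--         elif char.islower():
--             isLower = True
--
--         if isUpper and isLower:
--             return "mixed case"
--
--     if isUpper and not isLower:
--         return "uppercase"
--     elif not isUpper and isLower:
--         return "lowercase"
--
--     return "no letters"
-- ===== SOURCE B (Python) =====
-- def caseChecker(string):
--     has_upper = string != string.lower()   # lower() changes exactly the uppercase letters
--     has_lower = string != string.upper()   # upper() changes exactly the lowercase letters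
--     if has_upper and has_lower:
--         return "mixed case"
--     if has_upper:
--         return "uppercase"
--     if has_lower:
--         return "lowercase"
--     return "no letters"
-- ===== Notes on version B (the rewrite author's own statement) =====
-- stated objective: faster
-- what changed: Instead of scanning characters and maintaining upper/lower flags, B detects case by whole-string transformation: the string contains an uppercase letter iff it differs from its lower(), and a lowercase letter iff it differs from its upper(); a flat conditional on these two comparisons replaces A's flag-carrying loop with early exit.
import Mathlib
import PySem

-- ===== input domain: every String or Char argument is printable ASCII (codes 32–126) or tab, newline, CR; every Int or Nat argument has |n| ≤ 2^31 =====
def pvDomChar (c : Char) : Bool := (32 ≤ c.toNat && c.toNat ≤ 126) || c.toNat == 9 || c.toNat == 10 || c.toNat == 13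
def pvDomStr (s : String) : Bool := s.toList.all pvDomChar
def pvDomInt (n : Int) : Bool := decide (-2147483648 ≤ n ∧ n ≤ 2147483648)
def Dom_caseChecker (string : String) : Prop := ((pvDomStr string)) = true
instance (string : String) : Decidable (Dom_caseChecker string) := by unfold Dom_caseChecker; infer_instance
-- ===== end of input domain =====

-- B detects case by whole-string transformation (string differs from its lower()/upper())
-- instead of A's per-character flag-carrying loop with early exit (objective: faster — whole-string C-level transforms replace the per-char Python loop).

-- ===== PORT A =====
-- the for-loop over the characters, carrying the two flags; returning "mixed case" early
def caseCheckerLoop : List Char → Bool → Bool → String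
  | [], isUpper, isLower =>
    if isUpper && !isLower then "uppercase"
    else if !isUpper && isLower then "lowercase"
    else "no letters"
  | c :: cs, isUpper, isLower =>
    let isUpper' := if PySem.Chars.isupper c then true else isUpper
    let isLower' := if PySem.Chars.isupper c then isLower
                    else if PySem.Chars.islower c then true else isLower
    if isUpper' && isLower' then "mixed case"
    else caseCheckerLoop cs isUpper' isLower'

def caseChecker (string : String) : String :=
  caseCheckerLoop string.toList false false

-- ===== PORT B =====
def caseChecker_alt (string : String) : String :=
  let hasUpper := string ≠ PySem.Str.lower string
  let hasLower := string ≠ PySem.Str.upper string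
  if hasUpper ∧ hasLower then "mixed case"
  else if hasUpper then "uppercase"
  else if hasLower then "lowercase"
  else "no letters"

-- ===== PRECONDITION & SPEC =====
def Spec_caseChecker (string : String) (out : String) : Prop := out = caseChecker_alt string
instance (string : String) (out : String) : Decidable (Spec_caseChecker string out) := by unfold Spec_caseChecker; infer_instance

-- ===== CLAIM (what is proved, stated in full; the proofs are below) =====
def Claim_equal_caseChecker : Prop := ∀ (string : String), Dom_caseChecker string → Spec_caseChecker string (caseChecker string)

-- ===== LEMMAS AND PROOFS =====

theorem not_upper_and_lower (c : Char) :
    PySem.Chars.isupper c = true → PySem.Chars.islower c = false := by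
  simp only [PySem.Chars.isupper, PySem.Chars.islower, Bool.and_eq_true, decide_eq_true_eq,
    Bool.and_eq_false_iff, decide_eq_false_iff_not, Char.le_def, UInt32.le_iff_toNat_le]
  intro h
  left
  have hA : 'A'.val.toNat = 65 := rfl
  have hZ : 'Z'.val.toNat = 90 := rfl
  have ha : 'a'.val.toNat = 97 := rfl
  omega

-- the loop computes the flat classification of the accumulated flags
theorem caseCheckerLoop_eq (cs : List Char) : ∀ (u l : Bool), (u && l) = false →
    caseCheckerLoop cs u l =
      (let hu := u || cs.any PySem.Chars.isupper
       let hl := l || cs.any (fun c => !PySem.Chars.isupper c && PySem.Chars.islower c)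
       if hu && hl then "mixed case"
       else if hu then "uppercase"
       else if hl then "lowercase"
       else "no letters") := by
  induction cs with
  | nil =>
    intro u l h
    cases u <;> cases l <;> simp_all [caseCheckerLoop]
  | cons c cs ih =>
    intro u l h
    cases hu : PySem.Chars.isupper c <;> cases hl : PySem.Chars.islower c <;>
      simp only [caseCheckerLoop, List.any_cons, hu, hl, if_true, if_false,
        Bool.not_true, Bool.not_false, Bool.false_and, Bool.true_and, Bool.false_or,
        Bool.true_or, Bool.or_false] <;>
      cases u <;> cases l <;> simp_all [ih]

theorem any_lower_only (cs : List Char) :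
    cs.any (fun c => !PySem.Chars.isupper c && PySem.Chars.islower c)
      = cs.any PySem.Chars.islower := by
  induction cs with
  | nil => rfl
  | cons c cs ih =>
    simp only [List.any_cons, ih]
    cases hu : PySem.Chars.isupper c
    · simp
    · simp [not_upper_and_lower c hu]

-- lower() fixes a char exactly when it is not uppercase
theorem lowerChar_eq_self_iff (c : Char) :
    PySem.Chars.lowerChar c = c ↔ PySem.Chars.isupper c = false := by
  unfold PySem.Chars.lowerChar
  cases hu : PySem.Chars.isupper c
  · simp
  · simp only [if_true, iff_false, Bool.true_eq_false]
    intro he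
    have h1 : ('A' : Char) ≤ c ∧ c ≤ 'Z' := by
      simpa [PySem.Chars.isupper] using hu
    have hlt : c.toNat ≤ 90 := by
      have := h1.2
      simp only [Char.le_def, UInt32.le_iff_toNat_le] at this
      exact this
    have hval : (Char.ofNat (c.toNat + 32)).toNat = c.toNat + 32 := by
      have hv : Nat.isValidChar (c.toNat + 32) := by
        left; omega
      simp only [Char.ofNat, Char.ofNatAux, Char.toNat]
      split
      · rfl
      · exact absurd hv (by assumption)
    have h2 := congrArg Char.toNat he
    rw [hval] at h2
    omega

-- upper() fixes a char exactly when it is not lowercase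
theorem upperChar_eq_self_iff (c : Char) :
    PySem.Chars.upperChar c = c ↔ PySem.Chars.islower c = false := by
  unfold PySem.Chars.upperChar
  cases hl : PySem.Chars.islower c
  · simp
  · simp only [if_true, iff_false, Bool.true_eq_false]
    intro he
    have h1 : ('a' : Char) ≤ c ∧ c ≤ 'z' := by
      simpa [PySem.Chars.islower] using hl
    have hge : 97 ≤ c.toNat := by
      have := h1.1
      simp only [Char.le_def, UInt32.le_iff_toNat_le] at this
      exact this
    have hle : c.toNat ≤ 122 := by
      have := h1.2
      simp only [Char.le_def, UInt32.le_iff_toNat_le] at this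
      exact this
    have hval : (Char.ofNat (c.toNat - 32)).toNat = c.toNat - 32 := by
      have hv : Nat.isValidChar (c.toNat - 32) := by
        left; omega
      simp only [Char.ofNat, Char.ofNatAux, Char.toNat]
      split
      · rfl
      · exact absurd hv (by assumption)
    have h2 := congrArg Char.toNat he
    rw [hval] at h2
    omega

-- a map fixes a list iff it fixes every element
theorem map_fix_iff (f : Char → Char) (l : List Char) :
    l.map f = l ↔ ∀ x ∈ l, f x = x := by
  induction l with
  | nil => simp
  | cons a t ih =>
    simp only [List.map_cons, List.cons.injEq, List.mem_cons, ih]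
    constructor
    · rintro ⟨ha, ht⟩ x (rfl | hx)
      · exact ha
      · exact ht x hx
    · intro h
      exact ⟨h a (.inl rfl), fun x hx => h x (.inr hx)⟩

-- s differs from s.lower() iff some char is uppercase
theorem ne_lower_iff (s : String) :
    (s ≠ PySem.Str.lower s) ↔ s.toList.any PySem.Chars.isupper = true := by
  rw [ne_eq, ← String.toList_inj, PySem.Str.toList_lower, PySem.Chars.lower]
  constructor
  · intro h
    by_contra hany
    apply h
    rw [(map_fix_iff _ _).mpr]
    intro c hc
    rw [lowerChar_eq_self_iff]
    simp only [List.any_eq_true, not_exists, not_and] at hany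
    exact Bool.eq_false_iff.mpr (fun ht => (hany c hc) ht)
  · intro hany he
    obtain ⟨c, hc, hu⟩ := List.any_eq_true.mp hany
    have := (map_fix_iff _ _).mp he.symm c hc
    rw [lowerChar_eq_self_iff] at this
    simp [this] at hu

theorem ne_upper_iff (s : String) :
    (s ≠ PySem.Str.upper s) ↔ s.toList.any PySem.Chars.islower = true := by
  rw [ne_eq, ← String.toList_inj, PySem.Str.toList_upper, PySem.Chars.upper]
  constructor
  · intro h
    by_contra hany
    apply h
    rw [(map_fix_iff _ _).mpr]
    intro c hc
    rw [upperChar_eq_self_iff]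
    simp only [List.any_eq_true, not_exists, not_and] at hany
    exact Bool.eq_false_iff.mpr (fun ht => (hany c hc) ht)
  · intro hany he
    obtain ⟨c, hc, hl⟩ := List.any_eq_true.mp hany
    have := (map_fix_iff _ _).mp he.symm c hc
    rw [upperChar_eq_self_iff] at this
    simp [this] at hl

-- ===== VERDICT (by name: the statement is the Claim_ definition above) =====
theorem caseChecker_spec : Claim_equal_caseChecker := by
  intro s _
  unfold Spec_caseChecker caseChecker caseChecker_alt
  rw [caseCheckerLoop_eq s.toList false false rfl, any_lower_only]
  simp only [Bool.false_or]
  by_cases hu : s.toList.any PySem.Chars.isupper = true <;>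
    by_cases hl : s.toList.any PySem.Chars.islower = true <;>
      simp [hu, hl, ne_lower_iff, ne_upper_iff]
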